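-- pv_equiv track=rewrite | github.com/TheMaykilaz/AirportProject | airport/management/commands/populate_sample_data.py | generate_seat_map
-- ===== SOURCE A (Python) =====
-- def generate_seat_map(capacity):
--     """Generate a seat map for an airplane"""
--     seat_map = []
--     rows = (capacity // 6) + 1  # Approximate rows (6 seats per row)
--     seat_letters = ['A', 'B', 'C', 'D', 'E', 'F']
--
--     seat_num = 1
--     for row in range(1, rows + 1):
--         for letter in seat_letters:
--             if seat_num > capacity:
--                 break
--
--             # Determine seat class based on row
--             if row <= 3:
--                 seat_class = 'first'
--             elif row <= 8:
--                 seat_class = 'business'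
--             elif row <= 15:
--                 seat_class = 'premium_economy'
--             else:
--                 seat_class = 'economy'
--
--             seat_map.append({
--                 'seat_number': f"{row}{letter}",
--                 'seat_class': seat_class
--             })
--             seat_num += 1
--
--         if seat_num > capacity:
--             break
--
--     return seat_map
-- ===== SOURCE B (Python) =====
-- _SEAT_LETTERS = ['A', 'B', 'C', 'D', 'E', 'F']
--
--
-- def _seat(i):
--     """Seat dict for flat 0-based seat index i (6 seats per row)."""
--     row = i // 6 + 1
--     if row <= 3:
--         seat_class = 'first'
--     elif row <= 8:
--         seat_class = 'business'
--     elif row <= 15: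
--         seat_class = 'premium_economy'
--     else:
--         seat_class = 'economy'
--     return {'seat_number': f"{row}{_SEAT_LETTERS[i % 6]}", 'seat_class': seat_class}
--
--
-- def generate_seat_map(capacity):
--     """Generate a seat map for an airplane"""
--     return [_seat(i) for i in range(capacity)]
-- ===== Notes on version B (the rewrite author's own statement) =====
-- stated objective: simpler
-- what changed: Replaces the nested row-by-letter loops with their seat_num counter and two break statements by a single comprehension over the flat seat index i in range(capacity), deriving row and letter directly as i//6+1 and letters[i%6].
import Mathlib
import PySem

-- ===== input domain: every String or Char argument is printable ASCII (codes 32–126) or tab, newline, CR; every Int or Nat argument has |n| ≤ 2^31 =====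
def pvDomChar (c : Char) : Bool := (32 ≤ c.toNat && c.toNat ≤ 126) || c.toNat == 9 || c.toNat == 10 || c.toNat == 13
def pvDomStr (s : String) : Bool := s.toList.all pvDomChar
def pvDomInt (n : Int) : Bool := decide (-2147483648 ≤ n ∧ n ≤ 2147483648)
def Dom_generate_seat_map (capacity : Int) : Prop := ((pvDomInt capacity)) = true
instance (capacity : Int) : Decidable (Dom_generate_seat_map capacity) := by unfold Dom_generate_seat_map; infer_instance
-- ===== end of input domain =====

-- B replaces A's nested row/letter loops, seat counter and break logic with a single
-- comprehension over the flat seat index (simpler decomposition; same cost).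


-- ===== PORT A =====
-- seat-class chain of A, in A's branch order
def pvClassA (row : Int) : String :=
  if row ≤ 3 then "first"
  else if row ≤ 8 then "business"
  else if row ≤ 15 then "premium_economy"
  else "economy"

-- inner 'for letter in seat_letters' loop; a break returns the state unchanged
def pvInnerA (capacity row : Int) :
    List String → List (List (String × String)) → Int →
    (List (List (String × String)) × Int)
  | [], sm, sn => (sm, sn)
  | l :: ls, sm, sn =>
    if sn > capacity then (sm, sn)   -- break
    else pvInnerA capacity row ls
      (sm ++ [[("seat_number", PySem.Int.toStr row ++ l), ("seat_class", pvClassA row)]])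
      (sn + 1)

-- outer 'for row in range(1, rows + 1)' loop
def pvOuterA (capacity : Int) :
    List Int → List (List (String × String)) → Int → List (List (String × String))
  | [], sm, _ => sm
  | r :: rs, sm, sn =>
    let p := pvInnerA capacity r ["A", "B", "C", "D", "E", "F"] sm sn
    if p.2 > capacity then p.1      -- break
    else pvOuterA capacity rs p.1 p.2

def generate_seat_map (capacity : Int) : List (List (String × String)) :=
  let rows := PySem.Int.floordiv capacity 6 + 1
  pvOuterA capacity (PySem.List.pyRange 1 (rows + 1) 1) [] 1

-- ===== PORT B =====
-- _seat(i): seat dict for flat 0-based index i.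
-- _SEAT_LETTERS[i % 6]: for the i ≥ 0 produced by range, 0 ≤ i % 6 < 6, so the
-- Python indexing never raises and pyGetD with any default is exact.
def pvSeatB (i : Int) : List (String × String) :=
  let row := PySem.Int.floordiv i 6 + 1
  let cls :=
    if row ≤ 3 then "first"
    else if row ≤ 8 then "business"
    else if row ≤ 15 then "premium_economy"
    else "economy"
  [("seat_number",
      PySem.Int.toStr row ++
        PySem.List.pyGetD ["A", "B", "C", "D", "E", "F"] (PySem.Int.mod i 6) ""),
   ("seat_class", cls)]

def generate_seat_map_alt (capacity : Int) : List (List (String × String)) :=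
  (PySem.List.pyRange 0 capacity 1).map pvSeatB

-- ===== PRECONDITION & SPEC =====
def Spec_generate_seat_map (capacity : Int) (out : List (List (String × String))) : Prop := out = generate_seat_map_alt capacity
instance (capacity : Int) (out : List (List (String × String))) : Decidable (Spec_generate_seat_map capacity out) := by unfold Spec_generate_seat_map; infer_instance

-- ===== CLAIM (what is proved, stated in full; the proofs are below) =====
def Claim_equal_generate_seat_map : Prop := ∀ (capacity : Int), Dom_generate_seat_map capacity → Spec_generate_seat_map capacity (generate_seat_map capacity)

-- ===== LEMMAS AND PROOFS =====

-- B's seat at flat index 6*r + j (j < 6) has row r+1 and letter j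
lemma pvSeatB_split (r j : Nat) (hj : j < 6) :
    pvSeatB ((6 * r + j : Nat) : Int) =
      [("seat_number",
          PySem.Int.toStr ((r : Int) + 1) ++ ["A", "B", "C", "D", "E", "F"].getD j ""),
       ("seat_class", pvClassA ((r : Int) + 1))] := by
  have hd : PySem.Int.floordiv ((6 * r + j : Nat) : Int) 6 = (r : Int) := by
    rw [PySem.Int.floordiv_eq_ediv_of_pos (by omega)]; omega
  have hm : PySem.Int.mod ((6 * r + j : Nat) : Int) 6 = (j : Int) := by
    rw [PySem.Int.mod_eq_emod_of_pos (by omega)]; omega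
  simp only [pvSeatB, pvClassA, hd, hm, PySem.List.pyGetD_natCast]

-- inner loop: starting at letter j of row r+1 with seat counter 6r+j+1, the loop
-- appends B's seats for flat indices 6r+j, …, min n (6r+6) - 1
lemma pvInnerA_spec (n r : Nat) :
    ∀ (ls : List String) (j : Nat) (sm : List (List (String × String))),
      j + ls.length = 6 →
      (∀ t, t < ls.length → ls.getD t "" = ["A", "B", "C", "D", "E", "F"].getD (j + t) "") →
      pvInnerA (n : Int) ((r : Int) + 1) ls sm ((6 * r + j : Nat) + 1) =
        (sm ++ (List.range (min n (6 * r + 6) - (6 * r + j))).map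
            (fun t => pvSeatB ((6 * r + j + t : Nat) : Int)),
         ((max (min n (6 * r + 6)) (6 * r + j) : Nat) : Int) + 1) := by
  intro ls
  induction ls with
  | nil =>
    intro j sm hlen _
    have hj : j = 6 := by simpa using hlen
    subst hj
    have h1 : min n (6 * r + 6) - (6 * r + 6) = 0 := by omega
    have h2 : max (min n (6 * r + 6)) (6 * r + 6) = 6 * r + 6 := by omega
    simp [pvInnerA, h1]
  | cons l ls ih =>
    intro j sm hlen hget
    have hj : j < 6 := by simp at hlen; omega
    simp only [pvInnerA]
    by_cases hbr : n ≤ 6 * r + j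
    · -- break immediately
      rw [if_pos (show ((6 * r + j : Nat) : Int) + 1 > (n : Int) by push_cast; omega)]
      have h1 : min n (6 * r + 6) - (6 * r + j) = 0 := by omega
      have h2 : max (min n (6 * r + 6)) (6 * r + j) = 6 * r + j := by omega
      simp [h1, h2]
    · -- take this seat, recurse
      rw [if_neg (show ¬ (((6 * r + j : Nat) : Int) + 1 > (n : Int)) by push_cast; omega)]
      have hl : l = ["A", "B", "C", "D", "E", "F"].getD j "" := by
        have h := hget 0 (by simp)
        simpa using h
      have happ :
          (sm ++ [[("seat_number", PySem.Int.toStr ((r : Int) + 1) ++ l),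
                   ("seat_class", pvClassA ((r : Int) + 1))]]) =
          sm ++ [pvSeatB ((6 * r + j : Nat) : Int)] := by
        rw [pvSeatB_split r j hj, hl]
      have ihj := ih (j + 1) (sm ++ [pvSeatB ((6 * r + j : Nat) : Int)])
        (by simp at hlen ⊢; omega)
        (by intro t ht
            have h := hget (t + 1) (by simp only [List.length_cons]; omega)
            rw [List.getD_cons_succ] at h
            rw [show j + 1 + t = j + (t + 1) from by omega]
            exact h)
      have hcast : ((6 * r + j : Nat) : Int) + 1 + 1 = ((6 * r + (j + 1) : Nat) : Int) + 1 := by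
        push_cast; ring
      have hmin : 6 * r + j + 1 ≤ min n (6 * r + 6) := by omega
      have hmax1 : max (min n (6 * r + 6)) (6 * r + (j + 1)) = min n (6 * r + 6) := by omega
      have hmax0 : max (min n (6 * r + 6)) (6 * r + j) = min n (6 * r + 6) := by omega
      have hrange :
          (List.range (min n (6 * r + 6) - (6 * r + j))).map
              (fun t => pvSeatB ((6 * r + j + t : Nat) : Int)) =
            pvSeatB ((6 * r + j : Nat) : Int) ::
              (List.range (min n (6 * r + 6) - (6 * r + (j + 1)))).map
                (fun t => pvSeatB ((6 * r + (j + 1) + t : Nat) : Int)) := by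
        have hsub : min n (6 * r + 6) - (6 * r + j)
            = (min n (6 * r + 6) - (6 * r + (j + 1))) + 1 := by omega
        rw [hsub, List.range_succ_eq_map]
        simp only [List.map_cons, List.map_map, Nat.add_zero]
        congr 1
        apply List.map_congr_left
        intro t _
        simp only [Function.comp_apply]
        congr 1
        push_cast; omega
      rw [happ, hcast, ihj, hmax1, hmax0, hrange]
      simp [List.append_assoc]

-- last executed row: counter 6r+1, n ≤ 6r+6, the loop stops after this row
lemma pvOuterA_last (n r : Nat) (sm : List (List (String × String)))
    (hr : 6 * r ≤ n) (hterm : n ≤ 6 * r + 6) :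
    pvOuterA (n : Int) (PySem.List.pyRange ((r : Int) + 1) (((n / 6 : Nat) : Int) + 2) 1) sm
        ((6 * r : Nat) + 1) =
      sm ++ (List.range (n - 6 * r)).map (fun t => pvSeatB ((6 * r + t : Nat) : Int)) := by
  have hlt : ((r : Int) + 1) < ((n / 6 : Nat) : Int) + 2 := by
    have : r ≤ n / 6 := by omega
    push_cast; omega
  rw [PySem.List.pyRange_one_cons hlt]
  simp only [pvOuterA]
  have hin := pvInnerA_spec n r ["A", "B", "C", "D", "E", "F"] 0 sm (by simp)
    (by intro t _; simp)
  simp only [Nat.add_zero] at hin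
  rw [show min n (6 * r + 6) = n from by omega,
      show max n (6 * r) = n from by omega] at hin
  rw [hin]
  simp [show ((n : Nat) : Int) < ((n : Nat) : Int) + 1 from by omega]

-- outer loop: from row r+1 with counter 6r+1 (6r ≤ n), the remaining loop appends
-- B's seats for flat indices 6r, …, n-1
lemma pvOuterA_spec (n : Nat) :
    ∀ (m r : Nat) (sm : List (List (String × String))),
      n - 6 * r ≤ m → 6 * r ≤ n →
      pvOuterA (n : Int) (PySem.List.pyRange ((r : Int) + 1) (((n / 6 : Nat) : Int) + 2) 1) sm
          ((6 * r : Nat) + 1) =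
        sm ++ (List.range (n - 6 * r)).map (fun t => pvSeatB ((6 * r + t : Nat) : Int)) := by
  intro m
  induction m with
  | zero =>
    intro r sm hm hr
    exact pvOuterA_last n r sm hr (by omega)
  | succ m ih =>
    intro r sm hm hr
    by_cases hterm : n ≤ 6 * r + 6
    · exact pvOuterA_last n r sm hr hterm
    · -- full row, loop continues
      have hlt : ((r : Int) + 1) < ((n / 6 : Nat) : Int) + 2 := by
        have : r ≤ n / 6 := by omega
        push_cast; omega
      rw [PySem.List.pyRange_one_cons hlt]
      simp only [pvOuterA]
      have hin := pvInnerA_spec n r ["A", "B", "C", "D", "E", "F"] 0 sm (by simp)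
        (by intro t _; simp)
      simp only [Nat.add_zero] at hin
      rw [show min n (6 * r + 6) = 6 * r + 6 from by omega,
          show max (6 * r + 6) (6 * r) = 6 * r + 6 from by omega,
          show 6 * r + 6 - 6 * r = 6 from by omega] at hin
      rw [hin]
      rw [if_neg (show ¬ (((6 * r + 6 : Nat) : Int) + 1 > (n : Int)) by push_cast; omega)]
      have ihr := ih (r + 1) (sm ++ (List.range 6).map
          (fun t => pvSeatB ((6 * r + t : Nat) : Int))) (by omega) (by omega)
      rw [show ((r + 1 : Nat) : Int) + 1 = (r : Int) + 1 + 1 from by push_cast; ring,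
          show ((6 * (r + 1) : Nat) : Int) + 1 = ((6 * r + 6 : Nat) : Int) + 1 from by
            push_cast; ring] at ihr
      rw [ihr, List.append_assoc]
      congr 1
      rw [show n - 6 * r = 6 + (n - 6 * (r + 1)) from by omega, List.range_add,
          List.map_append, List.map_map]
      congr 1
      apply List.map_congr_left
      intro t _
      simp only [Function.comp_apply]
      congr 1
      push_cast; omega

-- the two ports agree on every Int capacity
lemma gsm_eq (capacity : Int) :
    generate_seat_map capacity = generate_seat_map_alt capacity := by
  by_cases hc : 0 ≤ capacity
  · obtain ⟨n, rfl⟩ : ∃ n : Nat, capacity = (n : Int) :=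
      ⟨capacity.toNat, (Int.toNat_of_nonneg hc).symm⟩
    show pvOuterA (n : Int)
        (PySem.List.pyRange 1 (PySem.Int.floordiv (n : Int) 6 + 1 + 1) 1) [] 1 =
      (PySem.List.pyRange 0 (n : Int) 1).map pvSeatB
    have hfd : PySem.Int.floordiv (n : Int) 6 = ((n / 6 : Nat) : Int) := by
      rw [PySem.Int.floordiv_eq_ediv_of_pos (by omega)]; omega
    rw [hfd]
    have h0 := pvOuterA_spec n (n + 1) 0 [] (by omega) (by omega)
    simp only [Nat.cast_zero, zero_add, Nat.mul_zero, Nat.sub_zero] at h0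
    rw [show ((n / 6 : Nat) : Int) + 1 + 1 = ((n / 6 : Nat) : Int) + 2 from by ring, h0]
    rw [PySem.List.pyRange_one]
    simp [List.map_map, Function.comp]
  · -- negative capacity: both loops run over empty ranges
    have hA : PySem.List.pyRange 1 (PySem.Int.floordiv capacity 6 + 1 + 1) 1 = [] := by
      apply PySem.List.pyRange_one_eq_nil
      rw [PySem.Int.floordiv_eq_ediv_of_pos (by omega)]
      omega
    have hB : PySem.List.pyRange 0 capacity 1 = [] :=
      PySem.List.pyRange_one_eq_nil (by omega)
    show pvOuterA capacity
        (PySem.List.pyRange 1 (PySem.Int.floordiv capacity 6 + 1 + 1) 1) [] 1 =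
      (PySem.List.pyRange 0 capacity 1).map pvSeatB
    rw [hA, hB]
    rfl

-- ===== VERDICT (by name: the statement is the Claim_ definition above) =====
theorem generate_seat_map_spec : Claim_equal_generate_seat_map := by
  intro capacity _
  show generate_seat_map capacity = generate_seat_map_alt capacity
  exact gsm_eq capacity
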